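-- pv_equiv track=rewrite | github.com/GabrielBertelliTorquato/Dicionario_Challenge | ex3.py | palavras_unicas_por_chave
-- ===== SOURCE A (Python) =====
-- def palavras_unicas_por_chave(dicionario):
--     palavras_unicas = {}
--     for chave, lista_palavras in dicionario.items():
--         contador_palavras = {}
--         for palavra in lista_palavras:
--             if palavra in contador_palavras:
--                 contador_palavras[palavra] += 1
--             else:
--                 contador_palavras[palavra] = 1
--
--         palavras_unicas[chave] = [palavra for palavra, contador in contador_palavras.items() if contador == 1]
--
--     return palavras_unicas
-- ===== SOURCE B (Python) =====
-- def palavras_unicas_por_chave(dicionario):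
--     resultado = {}
--     for chave, lista_palavras in dicionario.items():
--         vistas = set()
--         repetidas = set()
--         for palavra in lista_palavras:
--             if palavra in vistas:
--                 repetidas.add(palavra)
--             else:
--                 vistas.add(palavra)
--         resultado[chave] = [p for p in lista_palavras if p not in repetidas]
--     return resultado
-- ===== Notes on version B (the rewrite author's own statement) =====
-- stated objective: alternative
-- what changed: Replaces the per-key frequency counter (count every word, then emit counter keys with count 1) by a single seen/repeated two-set pass, emitting by filtering the original word list against the repeated set (first-occurrence order is preserved because count-1 words occur once).
import Mathlib
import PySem

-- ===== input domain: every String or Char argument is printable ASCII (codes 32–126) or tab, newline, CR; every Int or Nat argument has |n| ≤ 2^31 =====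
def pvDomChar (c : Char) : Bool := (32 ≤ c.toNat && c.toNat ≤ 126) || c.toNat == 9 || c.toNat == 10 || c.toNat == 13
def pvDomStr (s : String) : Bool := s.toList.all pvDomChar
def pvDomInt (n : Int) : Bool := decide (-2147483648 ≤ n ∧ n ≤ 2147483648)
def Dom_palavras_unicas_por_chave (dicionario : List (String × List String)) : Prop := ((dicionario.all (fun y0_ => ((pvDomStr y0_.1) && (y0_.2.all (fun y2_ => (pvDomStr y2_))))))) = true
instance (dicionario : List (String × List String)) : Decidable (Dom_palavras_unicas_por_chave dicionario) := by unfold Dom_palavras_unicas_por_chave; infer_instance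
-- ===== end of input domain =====

-- B replaces A's per-key word counter by a seen/repeated two-set pass and emits by
-- filtering the original word list (alternative data structure, same cost).

-- ===== PORT A =====
-- inner counting loop of A: 'if palavra in contador: contador[palavra] += 1 else: contador[palavra] = 1'
def pvContadorA (lista_palavras : List String) : PySem.Dict String Int :=
  lista_palavras.foldl
    (fun d palavra =>
      if d.contains palavra then d.insert palavra (((d.get? palavra).getD 0) + 1)
      else d.insert palavra 1)
    PySem.Dict.empty

def palavras_unicas_por_chave (dicionario : List (String × List String)) : List (String × List String) :=
  (dicionario.foldl
    (fun (palavras_unicas : PySem.Dict String (List String)) p =>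
      let contador_palavras := pvContadorA p.2
      palavras_unicas.insert p.1
        ((contador_palavras.items.filter (fun q => q.2 == (1 : Int))).map (·.1)))
    PySem.Dict.empty).items

-- ===== PORT B =====
-- inner loop of B: seen/repeated sets
def pvVistasRepetidas (lista_palavras : List String) : PySem.Set String × PySem.Set String :=
  lista_palavras.foldl
    (fun (s : PySem.Set String × PySem.Set String) palavra =>
      if PySem.Set.contains s.1 palavra then (s.1, PySem.Set.add s.2 palavra)
      else (PySem.Set.add s.1 palavra, s.2))
    (PySem.Set.empty, PySem.Set.empty)

def palavras_unicas_por_chave_alt (dicionario : List (String × List String)) : List (String × List String) :=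
  (dicionario.foldl
    (fun (resultado : PySem.Dict String (List String)) p =>
      let vr := pvVistasRepetidas p.2
      resultado.insert p.1 (p.2.filter (fun palavra => !(PySem.Set.contains vr.2 palavra))))
    PySem.Dict.empty).items

-- ===== PRECONDITION & SPEC =====
def Spec_palavras_unicas_por_chave (dicionario : List (String × List String)) (out : List (String × List String)) : Prop := out = palavras_unicas_por_chave_alt dicionario
instance (dicionario : List (String × List String)) (out : List (String × List String)) : Decidable (Spec_palavras_unicas_por_chave dicionario out) := by unfold Spec_palavras_unicas_por_chave; infer_instance

-- ===== CLAIM (what is proved, stated in full; the proofs are below) =====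
def Claim_equal_palavras_unicas_por_chave : Prop := ∀ (dicionario : List (String × List String)), Dom_palavras_unicas_por_chave dicionario → Spec_palavras_unicas_por_chave dicionario (palavras_unicas_por_chave dicionario)

-- ===== LEMMAS AND PROOFS =====

-- A's branchy counting loop is collections.Counter
theorem pvContadorA_eq_counter (l : List String) : pvContadorA l = PySem.Dict.counter l := by
  rw [← PySem.Dict.foldl_insert_getD_add_one_eq_counter]
  unfold pvContadorA
  congr 1
  funext d w
  by_cases h : d.contains w = true
  · simp [h, PySem.Dict.getD_eq_get?_getD]
  · simp [h, PySem.Dict.getD_of_not_contains d 0 (by simpa using h)]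

-- set(l) is a sublist of l (foldl Set.add only ever appends)
theorem pvOfList_sublist (l : List String) : ∀ acc : PySem.Set String,
    List.Sublist (l.foldl PySem.Set.add acc) (acc ++ l) := by
  induction l with
  | nil => intro acc; simp
  | cons x t ih =>
    intro acc
    simp only [List.foldl_cons]
    have h := ih (PySem.Set.add acc x)
    refine h.trans ?_
    unfold PySem.Set.add
    split
    · exact (List.append_sublist_append_left acc).mpr (List.sublist_cons_self x t)
    · simp [List.append_assoc]

-- membership invariant of B's seen/repeated loop
theorem pvVR_snd_mem (l : List String) : ∀ (s r : PySem.Set String) (w : String),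
    w ∈ (l.foldl
      (fun (s : PySem.Set String × PySem.Set String) palavra =>
        if PySem.Set.contains s.1 palavra then (s.1, PySem.Set.add s.2 palavra)
        else (PySem.Set.add s.1 palavra, s.2)) (s, r)).2 ↔
      w ∈ r ∨ (w ∈ s ∧ w ∈ l) ∨ 2 ≤ l.count w := by
  induction l with
  | nil => intro s r w; simp
  | cons x t ih =>
    intro s r w
    simp only [List.foldl_cons]
    by_cases hx : PySem.Set.contains s x = true
    · have hxs : x ∈ s := by simpa [PySem.Set.contains_eq_decide] using hx
      rw [if_pos hx, ih]
      rw [PySem.Set.mem_add]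
      by_cases hw : w = x
      · subst hw
        have h2 : 2 ≤ (w::t).count w ↔ 1 ≤ t.count w := by
          rw [List.count_cons_self]; omega
        have ht := List.count_pos_iff (a := w) (l := t)
        rw [h2]
        simp only [List.mem_cons]
        constructor
        · rintro (h | (h | h) | h)
          · tauto
          · tauto
          · tauto
          · exact Or.inr (Or.inl ⟨hxs, Or.inr (ht.mp (by omega))⟩)
        · rintro (h | ⟨h1, _⟩ | h)
          · tauto
          · rcases Nat.lt_or_ge (t.count w) 1 with hc | hc
            · tauto
            · tauto
          · tauto
      · have hcnt : (x::t).count w = t.count w := by simp [Ne.symm hw]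
        rw [hcnt]
        simp only [List.mem_cons, hw, false_or]
        tauto
    · have hxs : x ∉ s := by simpa [PySem.Set.contains_eq_decide] using hx
      rw [if_neg hx, ih]
      rw [PySem.Set.mem_add]
      by_cases hw : w = x
      · subst hw
        have ht := List.count_pos_iff (a := w) (l := t)
        have h2 : 2 ≤ (w::t).count w ↔ w ∈ t := by
          rw [List.count_cons_self, ← ht]; omega
        have h3 : 2 ≤ t.count w → w ∈ t := fun h => List.count_pos_iff.mp (by omega)
        rw [h2]
        simp only [List.mem_cons]
        constructor
        · rintro (h | ⟨(h1 | h1), ht⟩ | h)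
          · tauto
          · tauto
          · tauto
          · tauto
        · rintro (h | ⟨h1, _⟩ | h)
          · tauto
          · tauto
          · tauto
      · have hcnt : (x::t).count w = t.count w := by simp [Ne.symm hw]
        rw [hcnt]
        simp only [List.mem_cons, hw, false_or]
        tauto

-- the per-key value: A's counter emission equals B's repeated-set filter
theorem pvInner_eq (l : List String) :
    ((pvContadorA l).items.filter (fun q => q.2 == (1 : Int))).map (·.1)
      = l.filter (fun palavra => !(PySem.Set.contains (pvVistasRepetidas l).2 palavra)) := by
  rw [pvContadorA_eq_counter, PySem.Dict.items_counter]
  -- B's filter predicate agrees pointwise on l with 'count = 1'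
  have hpred : l.filter (fun palavra => !(PySem.Set.contains (pvVistasRepetidas l).2 palavra))
      = l.filter (fun w => (l.count w : Int) == 1) := by
    apply List.filter_congr
    intro w hw
    have hmem := pvVR_snd_mem l PySem.Set.empty PySem.Set.empty w
    have h1 : 1 ≤ l.count w := List.count_pos_iff.mpr hw
    by_cases h2 : 2 ≤ l.count w
    · have : w ∈ (pvVistasRepetidas l).2 := by
        rw [pvVistasRepetidas]; exact (hmem).mpr (by tauto)
      simp [this]
      omega
    · have : w ∉ (pvVistasRepetidas l).2 := by
        rw [pvVistasRepetidas]
        intro hc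
        rcases (hmem).mp hc with h | h | h
        · simp [PySem.Set.empty] at h
        · simp [PySem.Set.empty] at h
        · exact h2 h
      simp [this]
      omega
  rw [hpred]
  -- A side: filter-of-map collapses to a filter of set(l)
  have hA : (((PySem.Set.ofList l).map (fun k => (k, (l.count k : Int)))).filter
        (fun q => q.2 == (1 : Int))).map (·.1)
      = (PySem.Set.ofList l).filter (fun w => (l.count w : Int) == 1) := by
    rw [List.filter_map, List.map_map]
    simp [Function.comp_def]
  rw [hA]
  -- set(l).filter p = l.filter p when p-elements have count 1
  have hsub : List.Sublist ((PySem.Set.ofList l).filter (fun w => (l.count w : Int) == 1))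
      (l.filter (fun w => (l.count w : Int) == 1)) := by
    have := pvOfList_sublist l []
    simpa [PySem.Set.ofList] using List.Sublist.filter _ this
  have hnodupR : (l.filter (fun w => (l.count w : Int) == 1)).Nodup := by
    rw [List.nodup_iff_count_le_one]
    intro w
    by_cases hw : w ∈ l.filter (fun w => (l.count w : Int) == 1)
    · have hcw : l.count w = 1 := by
        have := (List.mem_filter.mp hw).2; simpa using this
      calc (l.filter (fun w => (l.count w : Int) == 1)).count w ≤ l.count w := List.Sublist.count_le w List.filter_sublist
        _ ≤ 1 := by omega
    · simp [List.count_eq_zero_of_not_mem hw]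
  have hperm : ((PySem.Set.ofList l).filter (fun w => (l.count w : Int) == 1)).Perm
      (l.filter (fun w => (l.count w : Int) == 1)) := by
    rw [List.perm_ext_iff_of_nodup ((PySem.Set.nodup_ofList l).filter _) hnodupR]
    intro w
    simp [List.mem_filter, PySem.Set.mem_ofList]
  exact hsub.eq_of_length hperm.length_eq

-- ===== VERDICT (by name: the statement is the Claim_ definition above) =====
theorem palavras_unicas_por_chave_spec : Claim_equal_palavras_unicas_por_chave := by
  intro dicionario _
  unfold Spec_palavras_unicas_por_chave palavras_unicas_por_chave palavras_unicas_por_chave_alt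
  congr 2
  funext d p
  simp only []
  rw [pvInner_eq]
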